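-- pv_equiv track=rewrite | github.com/lotusdezcliff/CS61A | Spring 2022/homeworks/hw03(Done)/hw03.py | has_subseq
-- ===== SOURCE A (Python) =====
-- def has_subseq(n, seq):
--     """
--     Complete has_subseq, a function which takes in a number n and a "sequence"
--     of digits seq and returns whether n contains seq as a subsequence, which
--     does not have to be consecutive.
--
--     >>> has_subseq(123, 12)
--     True
--     >>> has_subseq(141, 11)
--     True
--     >>> has_subseq(144, 12)
--     False
--     >>> has_subseq(144, 1441)
--     False
--     >>> has_subseq(1343412, 134)
--     True
--     """
--     "*** YOUR CODE HERE ***"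
--     # Impossible subseq
--     if seq > n:
--         return False
--
--     last_digit_n = n % 10
--     last_digit_seq = seq % 10
--
--     if seq == 0:
--         return True
--     if n == 0:
--         return False
--     if seq > 0 and n > 0:
--         if last_digit_n == last_digit_seq:
--             n, seq = n // 10, seq // 10
--         else:
--             n = n // 10
--     return has_subseq(n, seq)
-- ===== SOURCE B (Python) =====
-- def _digits(m):
--     # decimal digits of m, most-significant first (empty for m <= 0)
--     ds = []
--     while m > 0:
--         ds.append(m % 10)
--         m //= 10
--     ds.reverse()
--     return ds
--
--
-- def _is_subseq(t, s):
--     # is the list t a (not necessarily consecutive) subsequence of the list s?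
--     if not t:
--         return True
--     if not s:
--         return False
--     if t[0] == s[0]:
--         return _is_subseq(t[1:], s[1:])
--     return _is_subseq(t, s[1:])
--
--
-- def has_subseq(n, seq):
--     if seq > n:
--         return False
--     if seq == 0:
--         return True
--     if n == 0:
--         return False
--     return _is_subseq(_digits(seq), _digits(n))
-- ===== Notes on version B (the rewrite author's own statement) =====
-- stated objective: alternative
-- what changed: Replaces A's digit-by-digit arithmetic recursion (re-comparing seq>n at every step) by extracting both numbers' decimal digit lists once and running a standard recursive subsequence check over them; the early-exit guards for the zero/negative corners are kept.
import Mathlib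
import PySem

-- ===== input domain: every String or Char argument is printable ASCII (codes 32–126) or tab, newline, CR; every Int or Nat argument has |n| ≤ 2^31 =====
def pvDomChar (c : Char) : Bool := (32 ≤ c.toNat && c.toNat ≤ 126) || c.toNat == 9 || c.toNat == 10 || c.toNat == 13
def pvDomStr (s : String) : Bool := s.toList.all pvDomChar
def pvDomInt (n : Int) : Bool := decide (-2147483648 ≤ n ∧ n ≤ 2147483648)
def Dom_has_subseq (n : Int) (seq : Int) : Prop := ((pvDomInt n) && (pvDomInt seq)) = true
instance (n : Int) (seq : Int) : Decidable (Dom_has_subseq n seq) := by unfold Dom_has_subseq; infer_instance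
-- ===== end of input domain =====

-- B replaces A's digit-by-digit arithmetic recursion by one digit extraction plus a
-- standard recursive subsequence check over the digit lists (alternative decomposition).

-- termination helper cited by the ports' recursions
theorem pvFloordiv10_toNat_lt (m : Int) (h : 0 < m) :
    (PySem.Int.floordiv m 10).toNat < m.toNat := by
  rw [PySem.Int.floordiv_eq_ediv_of_pos (by norm_num)]
  omega

-- ===== PORT A =====
def has_subseq (n : Int) (seq : Int) : Bool :=
  if seq > n then false
  else if seq = 0 then true
  else if n = 0 then false
  else if 0 < seq ∧ 0 < n then
    -- last_digit comparison, then recurse on n // 10 (and seq // 10 on a match)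
    (if PySem.Int.mod n 10 = PySem.Int.mod seq 10 then
      has_subseq (PySem.Int.floordiv n 10) (PySem.Int.floordiv seq 10)
    else
      has_subseq (PySem.Int.floordiv n 10) seq)
  else
    -- Python recurses with UNCHANGED arguments here: infinite recursion (RecursionError).
    -- Excluded by Pre_has_subseq; the port returns false on this unreachable branch.
    false
termination_by n.toNat
decreasing_by
  · exact pvFloordiv10_toNat_lt n (by omega)
  · exact pvFloordiv10_toNat_lt n (by omega)

-- ===== PORT B =====
-- while m > 0: ds.append(m % 10); m //= 10   (accumulator = ds, least-significant first)
def pvDigitsAux (m : Int) (ds : List Int) : List Int :=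
  if 0 < m then pvDigitsAux (PySem.Int.floordiv m 10) (ds ++ [PySem.Int.mod m 10]) else ds
termination_by m.toNat
decreasing_by exact pvFloordiv10_toNat_lt m (by omega)

-- _digits: decimal digits, most-significant first (ds.reverse() at the end)
def pvDigits (m : Int) : List Int := (pvDigitsAux m []).reverse

-- _is_subseq
def pvIsSubseq (t : List Int) (s : List Int) : Bool :=
  match t, s with
  | [], _ => true
  | _, [] => false
  | a :: t', b :: s' => if a = b then pvIsSubseq t' s' else pvIsSubseq (a :: t') s'

def has_subseq_alt (n : Int) (seq : Int) : Bool :=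
  if seq > n then false
  else if seq = 0 then true
  else if n = 0 then false
  else pvIsSubseq (pvDigits seq) (pvDigits n)

-- ===== PRECONDITION & SPEC =====
-- Pre_ excludes exactly the inputs (seq < 0, n ≠ 0, seq ≤ n) on which A recurses with
-- unchanged arguments and raises RecursionError; A returns a value everywhere else.
def Pre_has_subseq (n : Int) (seq : Int) : Prop := 0 ≤ seq ∨ n = 0 ∨ n < seq
instance (n : Int) (seq : Int) : Decidable (Pre_has_subseq n seq) := by unfold Pre_has_subseq; infer_instance

def pvWitness_has_subseq : Int × Int := (1343412, 134)

def Spec_has_subseq (n : Int) (seq : Int) (out : Bool) : Prop := out = has_subseq_alt n seq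
instance (n : Int) (seq : Int) (out : Bool) : Decidable (Spec_has_subseq n seq out) := by unfold Spec_has_subseq; infer_instance

-- ===== CLAIM (what is proved, stated in full; the proofs are below) =====
def Claim_equal_has_subseq : Prop := ∀ (n : Int) (seq : Int), Dom_has_subseq n seq → Pre_has_subseq n seq → Spec_has_subseq n seq (has_subseq n seq)

-- ===== LEMMAS AND PROOFS =====

-- decimal digits, LEAST-significant first (the order A consumes them in)
def revDigits (m : Int) : List Int :=
  if 0 < m then PySem.Int.mod m 10 :: revDigits (PySem.Int.floordiv m 10) else []
termination_by m.toNat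
decreasing_by exact pvFloordiv10_toNat_lt m (by omega)

theorem revDigits_of_pos (m : Int) (h : 0 < m) :
    revDigits m = m % 10 :: revDigits (m / 10) := by
  rw [revDigits, if_pos h, PySem.Int.floordiv_eq_ediv_of_pos (by norm_num),
    PySem.Int.mod_eq_emod_of_pos (by norm_num)]

theorem revDigits_of_nonpos (m : Int) (h : ¬ 0 < m) : revDigits m = [] := by
  rw [revDigits, if_neg h]

theorem pvDigitsAux_eq (m : Int) (ds : List Int) :
    pvDigitsAux m ds = ds ++ revDigits m := by
  by_cases h : 0 < m
  · rw [pvDigitsAux, if_pos h, revDigits, if_pos h,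
      pvDigitsAux_eq (PySem.Int.floordiv m 10), List.append_assoc]
    rfl
  · rw [pvDigitsAux, if_neg h, revDigits, if_neg h, List.append_nil]
termination_by m.toNat
decreasing_by exact pvFloordiv10_toNat_lt m (by omega)

theorem pvDigits_eq (m : Int) : pvDigits m = (revDigits m).reverse := by
  rw [pvDigits, pvDigitsAux_eq, List.nil_append]

theorem pvIsSubseq_nil (s : List Int) : pvIsSubseq [] s = true := by cases s <;> rfl

theorem pvIsSubseq_cons_nil (a : Int) (t : List Int) : pvIsSubseq (a :: t) [] = false := rfl

theorem pvIsSubseq_cons_cons (a b : Int) (t s : List Int) :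
    pvIsSubseq (a :: t) (b :: s) =
      if a = b then pvIsSubseq t s else pvIsSubseq (a :: t) s := rfl

-- the greedy matcher decides the sublist relation
theorem pvIsSubseq_iff (t s : List Int) : pvIsSubseq t s = true ↔ List.Sublist t s := by
  induction s generalizing t with
  | nil =>
    cases t with
    | nil => simp [pvIsSubseq_nil]
    | cons a t' => simp [pvIsSubseq_cons_nil]
  | cons b s' ih =>
    cases t with
    | nil => simp [pvIsSubseq_nil]
    | cons a t' =>
      by_cases hab : a = b
      · subst hab
        rw [pvIsSubseq_cons_cons, if_pos rfl, ih, List.cons_sublist_cons]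
      · rw [pvIsSubseq_cons_cons, if_neg hab, ih, List.sublist_cons_iff]
        constructor
        · exact Or.inl
        · rintro (h | ⟨r, hr, _⟩)
          · exact h
          · exact absurd (by injection hr) hab

theorem revDigits_inj (a b : Int) (ha : 0 ≤ a) (hb : 0 ≤ b)
    (h : revDigits a = revDigits b) : a = b := by
  by_cases hpa : 0 < a
  · by_cases hpb : 0 < b
    · rw [revDigits_of_pos a hpa, revDigits_of_pos b hpb] at h
      have h1 : a % 10 = b % 10 := by injection h
      have h2 : revDigits (a / 10) = revDigits (b / 10) := by injection h
      have h3 : a / 10 = b / 10 :=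
        revDigits_inj (a / 10) (b / 10) (by omega) (by omega) h2
      omega
    · rw [revDigits_of_pos a hpa, revDigits_of_nonpos b hpb] at h
      exact absurd h (by simp)
  · by_cases hpb : 0 < b
    · rw [revDigits_of_nonpos a hpa, revDigits_of_pos b hpb] at h
      exact absurd h.symm (by simp)
    · omega
termination_by a.toNat
decreasing_by
  have := pvFloordiv10_toNat_lt a hpa
  rw [PySem.Int.floordiv_eq_ediv_of_pos (by norm_num)] at this
  exact this

theorem revDigits_length_mono (a b : Int) (ha : 0 < a) (hab : a ≤ b) :
    (revDigits a).length ≤ (revDigits b).length := by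
  have hb : 0 < b := by omega
  rw [revDigits_of_pos a ha, revDigits_of_pos b hb]
  simp only [List.length_cons, Nat.add_le_add_iff_right]
  by_cases h10 : 0 < a / 10
  · exact revDigits_length_mono (a / 10) (b / 10) h10 (by omega)
  · rw [revDigits_of_nonpos (a / 10) h10]; simp
termination_by a.toNat
decreasing_by omega

-- A's early exit 'seq > n' is correct: larger seq is never a digit subsequence
theorem not_subseq_of_gt (n seq : Int) (hn : 0 < n) (hgt : n < seq) :
    pvIsSubseq (revDigits seq) (revDigits n) = false := by
  by_contra h
  have htrue : pvIsSubseq (revDigits seq) (revDigits n) = true := by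
    cases hv : pvIsSubseq (revDigits seq) (revDigits n)
    · exact absurd hv h
    · rfl
  have hsub : List.Sublist (revDigits seq) (revDigits n) := (pvIsSubseq_iff _ _).mp htrue
  have hlen1 : (revDigits seq).length ≤ (revDigits n).length := hsub.length_le
  have hlen2 : (revDigits n).length ≤ (revDigits seq).length :=
    revDigits_length_mono n seq hn (by omega)
  have heq : revDigits seq = revDigits n := hsub.eq_of_length (by omega)
  have := revDigits_inj seq n (by omega) (by omega) heq
  omega

-- characterisation of A on the positive core: it is the greedy matcher on the
-- least-significant-first digit lists
theorem has_subseq_char (n seq : Int) (hn : 0 < n) (hs : 0 < seq) :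
    has_subseq n seq = pvIsSubseq (revDigits seq) (revDigits n) := by
  by_cases hgt : seq > n
  · rw [has_subseq, if_pos hgt, not_subseq_of_gt n seq hn hgt]
  · rw [has_subseq, if_neg hgt, if_neg (by omega), if_neg (by omega),
      if_pos ⟨hs, hn⟩, revDigits_of_pos n hn, revDigits_of_pos seq hs,
      PySem.Int.floordiv_eq_ediv_of_pos (by norm_num),
      PySem.Int.floordiv_eq_ediv_of_pos (by norm_num),
      PySem.Int.mod_eq_emod_of_pos (by norm_num),
      PySem.Int.mod_eq_emod_of_pos (by norm_num)]
    by_cases hd : n % 10 = seq % 10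
    · rw [if_pos hd, pvIsSubseq_cons_cons, if_pos hd.symm]
      by_cases hs10 : 0 < seq / 10
      · by_cases hn10 : 0 < n / 10
        · exact has_subseq_char (n / 10) (seq / 10) hn10 hs10
        · -- n / 10 = 0 but seq / 10 > 0: A exits via 'seq > n', matcher fails on []
          have hn0 : n / 10 = 0 := by omega
          rw [has_subseq, if_pos (by omega), hn0, revDigits_of_nonpos 0 (by omega),
            revDigits_of_pos (seq / 10) hs10, pvIsSubseq_cons_nil]
      · -- seq / 10 = 0: A returns True via 'seq == 0', matcher accepts []
        have hs0 : seq / 10 = 0 := by omega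
        rw [has_subseq, hs0, if_neg (by omega), if_pos rfl,
          revDigits_of_nonpos 0 (by omega), pvIsSubseq_nil]
    · rw [if_neg hd, pvIsSubseq, if_neg (fun h => hd h.symm)]
      rw [← revDigits_of_pos seq hs]
      by_cases hn10 : 0 < n / 10
      · exact has_subseq_char (n / 10) seq hn10 hs
      · -- n / 10 = 0: A exits via 'seq > 0 = n', matcher fails on []
        have hn0 : n / 10 = 0 := by omega
        rw [has_subseq, if_pos (by omega), hn0, revDigits_of_nonpos 0 (by omega)]
        rw [revDigits_of_pos seq hs, pvIsSubseq_cons_nil]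
termination_by n.toNat
decreasing_by all_goals omega

-- the matcher is invariant under reversing both lists (both decide the sublist relation)
theorem pvIsSubseq_reverse (t s : List Int) :
    pvIsSubseq t.reverse s.reverse = pvIsSubseq t s := by
  cases h1 : pvIsSubseq t s
  · cases h2 : pvIsSubseq t.reverse s.reverse
    · rfl
    · have hr : List.Sublist t.reverse s.reverse := (pvIsSubseq_iff _ _).mp h2
      have hts : List.Sublist t s := List.reverse_sublist.mp hr
      rw [← pvIsSubseq_iff t s, h1] at hts
      exact absurd hts (by simp)
  · have hts : List.Sublist t s := (pvIsSubseq_iff _ _).mp h1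
    exact (pvIsSubseq_iff _ _).mpr (List.reverse_sublist.mpr hts)

-- ===== VERDICT (by name: the statement is the Claim_ definition above) =====
theorem has_subseq_spec : Claim_equal_has_subseq := by
  intro n seq _ hpre
  unfold Spec_has_subseq
  by_cases h1 : seq > n
  · rw [has_subseq, if_pos h1, has_subseq_alt, if_pos h1]
  · by_cases h2 : seq = 0
    · rw [has_subseq, if_neg h1, if_pos h2, has_subseq_alt, if_neg h1, if_pos h2]
    · by_cases h3 : n = 0
      · rw [has_subseq, if_neg h1, if_neg h2, if_pos h3,
          has_subseq_alt, if_neg h1, if_neg h2, if_pos h3]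
      · have hs : 0 < seq := by
          rcases hpre with h | h | h
          · omega
          · exact absurd h h3
          · omega
        have hn : 0 < n := by omega
        rw [has_subseq_alt, if_neg h1, if_neg h2, if_neg h3,
          pvDigits_eq, pvDigits_eq, pvIsSubseq_reverse]
        exact has_subseq_char n seq hn hs
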